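-- pv_equiv track=rewrite | github.com/drgoharyAI/DrGoAI | app/services/rules_engine.py | _classify_service_type
-- ===== SOURCE A (Python) =====
-- from typing import Dict, Any, List, Tuple, Optional
--
-- def _classify_service_type(service: Dict[str, Any]) -> str:
--     """Classify service into categories"""
--     description = service.get("description", "").lower()
--     code = service.get("code", "")
--
--     # Simple classification based on keywords
--     if any(kw in description for kw in ["consult", "visit", "exam"]):
--         return "consultation"
--     elif any(kw in description for kw in ["surgery", "operation"]):
--         return "surgery"
--     elif any(kw in description for kw in ["mri", "ct", "scan", "xray", "x-ray"]):
--         return "diagnostics"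
--     elif any(kw in description for kw in ["therapy", "rehabilitation"]):
--         return "therapy"
--     elif any(kw in description for kw in ["medication", "drug", "prescription"]):
--         return "pharmacy"
--     else:
--         return "other"
-- ===== SOURCE B (Python) =====
-- _KEYWORDS = [
--     ("consult", 0, "consultation"), ("visit", 0, "consultation"), ("exam", 0, "consultation"),
--     ("surgery", 1, "surgery"), ("operation", 1, "surgery"),
--     ("mri", 2, "diagnostics"), ("ct", 2, "diagnostics"), ("scan", 2, "diagnostics"),
--     ("xray", 2, "diagnostics"), ("x-ray", 2, "diagnostics"),
--     ("therapy", 3, "therapy"), ("rehabilitation", 3, "therapy"),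
--     ("medication", 4, "pharmacy"), ("drug", 4, "pharmacy"),
--     ("prescription", 4, "pharmacy"),
-- ]
--
-- def _classify_service_type(service):
--     """Classify by one accumulator pass over a flat keyword list: keep the
--     lowest-priority matching keyword's category; no grouped branches, no early return."""
--     description = service.get("description", "").lower()
--     code = service.get("code", "")
--     best = None
--     for kw, prio, cat in _KEYWORDS:
--         if kw in description and (best is None or prio < best[0]):
--             best = (prio, cat)
--     return best[1] if best is not None else "other"
-- ===== Notes on version B (the rewrite author's own statement) =====
-- stated objective: alternative
-- what changed: The short-circuiting grouped if/elif chain is replaced by a single min-tracking accumulator pass over a flat (keyword, priority, category) list: every keyword is tested and the lowest-priority match wins, instead of returning from the first matching group.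
import Mathlib
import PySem

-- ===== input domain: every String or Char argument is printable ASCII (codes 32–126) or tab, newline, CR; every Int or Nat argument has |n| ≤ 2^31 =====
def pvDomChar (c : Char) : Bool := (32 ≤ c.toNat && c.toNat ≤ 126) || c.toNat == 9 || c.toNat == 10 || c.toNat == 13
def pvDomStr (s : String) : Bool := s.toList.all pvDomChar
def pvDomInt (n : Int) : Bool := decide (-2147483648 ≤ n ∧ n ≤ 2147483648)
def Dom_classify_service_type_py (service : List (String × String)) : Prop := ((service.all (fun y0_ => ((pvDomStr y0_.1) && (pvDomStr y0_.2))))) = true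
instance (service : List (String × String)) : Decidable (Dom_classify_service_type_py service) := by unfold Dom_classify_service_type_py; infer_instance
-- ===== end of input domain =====

-- B replaces A's short-circuiting if/elif keyword chain by one min-tracking accumulator pass over a flat keyword list; alternative decomposition, same cost.


-- ===== PORT A =====
-- service.get(k, "") on the association list: first matching key, "" if absent
def pvGetD (service : List (String × String)) (k : String) : String :=
  ((service.find? (fun p => p.1 == k)).map Prod.snd).getD ""

def classify_service_type_py (service : List (String × String)) : String :=
  let description := PySem.Str.lower (pvGetD service "description")
  let _code := pvGetD service "code"
  if ["consult", "visit", "exam"].any (fun kw => PySem.Str.isIn kw description) then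
    "consultation"
  else if ["surgery", "operation"].any (fun kw => PySem.Str.isIn kw description) then
    "surgery"
  else if ["mri", "ct", "scan", "xray", "x-ray"].any (fun kw => PySem.Str.isIn kw description) then
    "diagnostics"
  else if ["therapy", "rehabilitation"].any (fun kw => PySem.Str.isIn kw description) then
    "therapy"
  else if ["medication", "drug", "prescription"].any (fun kw => PySem.Str.isIn kw description) then
    "pharmacy"
  else
    "other"

-- ===== PORT B =====
-- the flat _KEYWORDS list of Source B: (keyword, priority, category)
def pvKW : List (String × Nat × String) :=
  [("consult", 0, "consultation"), ("visit", 0, "consultation"), ("exam", 0, "consultation"),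
   ("surgery", 1, "surgery"), ("operation", 1, "surgery"),
   ("mri", 2, "diagnostics"), ("ct", 2, "diagnostics"), ("scan", 2, "diagnostics"),
   ("xray", 2, "diagnostics"), ("x-ray", 2, "diagnostics"),
   ("therapy", 3, "therapy"), ("rehabilitation", 3, "therapy"),
   ("medication", 4, "pharmacy"), ("drug", 4, "pharmacy"),
   ("prescription", 4, "pharmacy")]

-- the loop body of Source B: update best if kw matches and (best is None or prio < best[0])
def pvStep (d : String) (acc : Option (Nat × String)) (t : String × Nat × String) : Option (Nat × String) :=
  if PySem.Str.isIn t.1 d && (match acc with | none => true | some b => decide (t.2.1 < b.1)) then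
    some (t.2.1, t.2.2)
  else acc

def classify_service_type_py_alt (service : List (String × String)) : String :=
  let description := PySem.Str.lower (pvGetD service "description")
  let _code := pvGetD service "code"
  match pvKW.foldl (pvStep description) none with
  | some b => b.2
  | none => "other"

-- ===== PRECONDITION & SPEC =====
def Spec_classify_service_type_py (service : List (String × String)) (out : String) : Prop := out = classify_service_type_py_alt service
instance (service : List (String × String)) (out : String) : Decidable (Spec_classify_service_type_py service out) := by unfold Spec_classify_service_type_py; infer_instance

-- ===== CLAIM (what is proved, stated in full; the proofs are below) =====
def Claim_equal_classify_service_type_py : Prop := ∀ (service : List (String × String)), Dom_classify_service_type_py service → Spec_classify_service_type_py service (classify_service_type_py service)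

-- ===== LEMMAS AND PROOFS =====

-- Once best is set to a priority no later entry beats, the fold keeps it.
theorem pv_foldl_frozen (d : String) (b : Nat × String) :
    ∀ (l : List (String × Nat × String)), (∀ t ∈ l, b.1 ≤ t.2.1) →
      l.foldl (pvStep d) (some b) = some b := by
  intro l
  induction l with
  | nil => intro _; rfl
  | cons t l ih =>
    intro h
    have hb : b.1 ≤ t.2.1 := h t (List.mem_cons_self ..)
    have hstep : pvStep d (some b) t = some b := by
      simp [pvStep, Nat.not_lt.mpr hb]
    simpa [List.foldl, hstep] using ih (fun u hu => h u (List.mem_cons_of_mem _ hu))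

-- On a list with non-decreasing priorities, the min-tracking fold is the FIRST match.
theorem pv_foldl_eq_find (d : String) :
    ∀ (l : List (String × Nat × String)),
      l.Pairwise (fun a t => a.2.1 ≤ t.2.1) →
      l.foldl (pvStep d) none
        = (l.find? (fun t => PySem.Str.isIn t.1 d)).map (fun t => (t.2.1, t.2.2)) := by
  intro l
  induction l with
  | nil => intro _; rfl
  | cons t l ih =>
    intro hp
    rcases List.pairwise_cons.mp hp with ⟨hle, hp'⟩
    cases h : PySem.Chars.isIn t.1.toList d.toList with
    | true =>
      have hstep : pvStep d none t = some (t.2.1, t.2.2) := by simp [pvStep, h]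
      simp [List.foldl, hstep, List.find?, h, pv_foldl_frozen d (t.2.1, t.2.2) l hle]
    | false =>
      have hstep : pvStep d none t = none := by simp [pvStep, h]
      simp [List.foldl, hstep, List.find?, h, ih hp']

-- the fully boolean content of the equivalence: first-true group of A vs first match of B's flat list
theorem pvBool : ∀ (b1 b2 b3 b4 b5 b6 b7 b8 b9 b10 b11 b12 b13 b14 b15 : Bool),
    (if (b1 || (b2 || (b3 || false))) = true then "consultation"
      else if (b4 || (b5 || false)) = true then "surgery"
      else if (b6 || (b7 || (b8 || (b9 || (b10 || false))))) = true then "diagnostics"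
      else if (b11 || (b12 || false)) = true then "therapy"
      else if (b13 || (b14 || (b15 || false))) = true then "pharmacy"
      else "other")
      = (match Option.map (fun t => (t.2.1, t.2.2)) (match b1 with | true => some ("consult", 0, "consultation") | false => (match b2 with | true => some ("visit", 0, "consultation") | false => (match b3 with | true => some ("exam", 0, "consultation") | false => (match b4 with | true => some ("surgery", 1, "surgery") | false => (match b5 with | true => some ("operation", 1, "surgery") | false => (match b6 with | true => some ("mri", 2, "diagnostics") | false => (match b7 with | true => some ("ct", 2, "diagnostics") | false => (match b8 with | true => some ("scan", 2, "diagnostics") | false => (match b9 with | true => some ("xray", 2, "diagnostics") | false => (match b10 with | true => some ("x-ray", 2, "diagnostics") | false => (match b11 with | true => some ("therapy", 3, "therapy") | false => (match b12 with | true => some ("rehabilitation", 3, "therapy") | false => (match b13 with | true => some ("medication", 4, "pharmacy") | false => (match b14 with | true => some ("drug", 4, "pharmacy") | false => (match b15 with | true => some ("prescription", 4, "pharmacy") | false => (none : Option (String × Nat × String))))))))))))))))) with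
         | some b => b.2
         | none => "other") := by
  decide

-- ===== VERDICT (by name: the statement is the Claim_ definition above) =====
theorem classify_service_type_py_spec : Claim_equal_classify_service_type_py := by
  intro service _
  unfold Spec_classify_service_type_py
  simp only [classify_service_type_py, classify_service_type_py_alt]
  rw [pv_foldl_eq_find _ pvKW (by decide)]
  generalize PySem.Str.lower (pvGetD service "description") = S
  simp only [pvKW, List.find?_cons, List.any_cons, List.any_nil]
  exact pvBool _ _ _ _ _ _ _ _ _ _ _ _ _ _ _
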